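-- pv_equiv track=rewrite | github.com/HmbleCreator/PhonoSemantics | paper-web/build_site.py | collect_bracket_math
-- ===== SOURCE A (Python) =====
-- def collect_bracket_math(lines: list[str], start: int) -> tuple[str, int]:
--     collected: list[str] = []
--     idx = start + 1
--     while idx < len(lines):
--         if lines[idx].strip() == r"\]":
--             return "\n".join(collected).strip(), idx + 1
--         collected.append(lines[idx])
--         idx += 1
--     raise ValueError("Display math block was not closed")
-- ===== SOURCE B (Python) =====
-- def collect_bracket_math(lines: list[str], start: int) -> tuple[str, int]:
--     found = next((i for i in range(start + 1, len(lines))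
--                   if lines[i].strip() == r"\]"), None)
--     if found is None:
--         raise ValueError("Display math block was not closed")
--     return "\n".join(lines[i] for i in range(start + 1, found)).strip(), found + 1
-- ===== Notes on version B (the rewrite author's own statement) =====
-- stated objective: alternative
-- what changed: Replaces the interleaved test-and-append accumulator loop by a locate-the-closing-line-then-slice decomposition: first find the index of the first line stripping to \], then join the lines between start+1 and that index.
import Mathlib
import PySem

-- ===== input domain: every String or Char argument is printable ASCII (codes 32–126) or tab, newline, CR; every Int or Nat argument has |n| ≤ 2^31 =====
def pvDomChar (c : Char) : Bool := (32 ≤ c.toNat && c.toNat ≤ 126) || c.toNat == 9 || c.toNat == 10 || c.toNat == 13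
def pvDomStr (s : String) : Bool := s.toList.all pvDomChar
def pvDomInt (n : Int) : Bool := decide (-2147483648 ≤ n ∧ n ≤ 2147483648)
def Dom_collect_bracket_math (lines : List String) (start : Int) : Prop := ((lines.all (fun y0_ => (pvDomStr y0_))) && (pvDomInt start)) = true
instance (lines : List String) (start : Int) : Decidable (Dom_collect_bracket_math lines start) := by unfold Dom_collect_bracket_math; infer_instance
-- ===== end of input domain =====

-- B replaces A's interleaved test-and-append accumulator loop by a different decomposition:
-- locate the index of the first closing line, then join the lines strictly between start+1 and it.

-- ===== PORT A =====
-- A's while-loop: scan from idx, appending each line to `collected`, returning on the closing line.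
-- none = Python raises (IndexError from lines[idx] with idx < -len, or ValueError at fall-through).
def pvAloop (lines : List String) (idx : Int) (collected : List String) : Option (String × Int) :=
  if _h : idx < (lines.length : Int) then
    match PySem.List.pyGet? lines idx with
    | none => none
    | some s =>
      if PySem.Str.strip s = "\\]" then
        some (PySem.Str.strip (PySem.Str.join "\n" collected), idx + 1)
      else pvAloop lines (idx + 1) (collected ++ [s])
  else none
termination_by ((lines.length : Int) - idx).toNat
decreasing_by omega

def collect_bracket_math (lines : List String) (start : Int) : String × Int :=
  (pvAloop lines (start + 1) []).getD ("", 0)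

-- ===== PORT B =====
-- B: find the first i in range(start+1, len(lines)) whose line strips to "\]",
-- then join lines[i] for i in range(start+1, found) and strip. ("", 0) = the raising branch, outside Pre_.
def collect_bracket_math_alt (lines : List String) (start : Int) : String × Int :=
  match (PySem.List.pyRange (start + 1) lines.length 1).find?
          (fun i => (PySem.List.pyGet? lines i).map PySem.Str.strip == some "\\]") with
  | some found =>
      (PySem.Str.strip (PySem.Str.join "\n"
          ((PySem.List.pyRange (start + 1) found 1).map
            (fun i => (PySem.List.pyGet? lines i).getD ""))), found + 1)
  | none => ("", 0)

-- ===== PRECONDITION & SPEC =====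
-- Pre_ = exactly the inputs on which Python A returns: no IndexError during the scan
-- (start+1 ≥ -len) and some scanned line strips to "\]" (else ValueError at fall-through).
def Pre_collect_bracket_math (lines : List String) (start : Int) : Prop :=
  (-(lines.length : Int) ≤ start + 1) ∧
  ((PySem.List.pyRange (start + 1) lines.length 1).any
     (fun i => (PySem.List.pyGet? lines i).map PySem.Str.strip == some "\\]")) = true
instance (lines : List String) (start : Int) : Decidable (Pre_collect_bracket_math lines start) := by
  unfold Pre_collect_bracket_math; infer_instance

def pvWitness_collect_bracket_math : List String × Int := (["x + y", " \\] "], -1)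

def Spec_collect_bracket_math (lines : List String) (start : Int) (out : String × Int) : Prop := out = collect_bracket_math_alt lines start
instance (lines : List String) (start : Int) (out : String × Int) : Decidable (Spec_collect_bracket_math lines start out) := by unfold Spec_collect_bracket_math; infer_instance

-- ===== CLAIM (what is proved, stated in full; the proofs are below) =====
def Claim_equal_collect_bracket_math : Prop := ∀ (lines : List String) (start : Int), Dom_collect_bracket_math lines start → Pre_collect_bracket_math lines start → Spec_collect_bracket_math lines start (collect_bracket_math lines start)

-- ===== LEMMAS AND PROOFS =====

-- A's loop equals B's locate-then-slice shape, for any accumulator and any in-range start index.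
lemma pvAloop_eq (lines : List String) (fuel : Nat) :
    ∀ (idx : Int) (collected : List String),
      ((lines.length : Int) - idx).toNat = fuel →
      -(lines.length : Int) ≤ idx →
      pvAloop lines idx collected =
        match (PySem.List.pyRange idx lines.length 1).find?
                (fun i => (PySem.List.pyGet? lines i).map PySem.Str.strip == some "\\]") with
        | some j =>
            some (PySem.Str.strip (PySem.Str.join "\n"
                (collected ++ (PySem.List.pyRange idx j 1).map
                  (fun i => (PySem.List.pyGet? lines i).getD ""))), j + 1)
        | none => none := by
  induction fuel with
  | zero =>
    intro idx collected hfuel _hlo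
    have hge : (lines.length : Int) ≤ idx := by omega
    rw [pvAloop, PySem.List.pyRange_one_eq_nil hge]
    simp [not_lt.mpr hge]
  | succ n ih =>
    intro idx collected hfuel hlo
    have hlt : idx < (lines.length : Int) := by omega
    have hin : PySem.Raise.InRange lines.length idx := by
      simp [PySem.Raise.InRange]; omega
    obtain ⟨s, hs⟩ : ∃ s, PySem.List.pyGet? lines idx = some s := by
      cases h : PySem.List.pyGet? lines idx with
      | none => exact absurd ((PySem.List.pyGet?_eq_none_iff _ _).mp h) (by simpa using hin)
      | some s => exact ⟨s, rfl⟩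
    rw [pvAloop, PySem.List.pyRange_one_cons hlt]
    simp only [hlt, dif_pos, hs]
    by_cases hmatch : PySem.Str.strip s = "\\]"
    · rw [List.find?_cons_of_pos (h := by simp [hs, hmatch])]
      simp [hmatch, PySem.List.pyRange_one_eq_nil (le_refl idx)]
    · rw [if_neg hmatch, List.find?_cons_of_neg (h := by simp [hs, hmatch])]
      rw [ih (idx + 1) (collected ++ [s]) (by omega) (by omega)]
      cases hfind : (PySem.List.pyRange (idx + 1) (lines.length : Int) 1).find?
          (fun i => (PySem.List.pyGet? lines i).map PySem.Str.strip == some "\\]") with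
      | none => simp
      | some j =>
        have hj : idx + 1 ≤ j := by
          have := List.mem_of_find?_eq_some hfind
          have := (PySem.List.mem_pyRange_one).mp this
          omega
        have hsplit : PySem.List.pyRange idx j 1 = idx :: PySem.List.pyRange (idx + 1) j 1 :=
          PySem.List.pyRange_one_cons (by omega)
        simp [hsplit, hs]

-- ===== VERDICT (by name: the statement is the Claim_ definition above) =====
theorem collect_bracket_math_spec : Claim_equal_collect_bracket_math := by
  intro lines start _hdom hpre
  unfold Spec_collect_bracket_math collect_bracket_math collect_bracket_math_alt
  rw [pvAloop_eq lines ((lines.length : Int) - (start + 1)).toNat (start + 1) [] rfl hpre.1]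
  cases hfind : (PySem.List.pyRange (start + 1) (lines.length : Int) 1).find?
      (fun i => (PySem.List.pyGet? lines i).map PySem.Str.strip == some "\\]") with
  | none => simp
  | some j => simp
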